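-- pv_equiv track=rewrite | github.com/jesusleandroleonbotello/python-jesus | lectura archivo/clase_matriz.py | calcProMaxIngSem
-- ===== SOURCE A (Python) =====
-- def calcProMaxIngSem(matVtas, matPrecios):
--     fil = len(matVtas)
--     lstTotVtas = [0] * fil
--     for f in range(fil):
--         lstTotVtas[f] = sum(matVtas[f]) * matPrecios[f]
--     maxVtas = max(lstTotVtas)
--     prodMaxVtas = lstTotVtas.index(maxVtas) + 1
--     return prodMaxVtas
-- ===== SOURCE B (Python) =====
-- def calcProMaxIngSem(matVtas, matPrecios):
--     best = None  # (total, row index) of the best row seen so far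
--     for f, fila in enumerate(matVtas):
--         tot = sum(fila) * matPrecios[f]
--         if best is None or tot > best[0]:
--             best = (tot, f)
--     return best[1] + 1
-- ===== Notes on version B (the rewrite author's own statement) =====
-- stated objective: simpler
-- what changed: Replaces A's three passes (build a totals list, take max, re-scan with .index) by one single-pass argmax loop that keeps the best total and its index, updating only on strictly greater totals to preserve the first-occurrence tie-break; no intermediate list is built.
import Mathlib
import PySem

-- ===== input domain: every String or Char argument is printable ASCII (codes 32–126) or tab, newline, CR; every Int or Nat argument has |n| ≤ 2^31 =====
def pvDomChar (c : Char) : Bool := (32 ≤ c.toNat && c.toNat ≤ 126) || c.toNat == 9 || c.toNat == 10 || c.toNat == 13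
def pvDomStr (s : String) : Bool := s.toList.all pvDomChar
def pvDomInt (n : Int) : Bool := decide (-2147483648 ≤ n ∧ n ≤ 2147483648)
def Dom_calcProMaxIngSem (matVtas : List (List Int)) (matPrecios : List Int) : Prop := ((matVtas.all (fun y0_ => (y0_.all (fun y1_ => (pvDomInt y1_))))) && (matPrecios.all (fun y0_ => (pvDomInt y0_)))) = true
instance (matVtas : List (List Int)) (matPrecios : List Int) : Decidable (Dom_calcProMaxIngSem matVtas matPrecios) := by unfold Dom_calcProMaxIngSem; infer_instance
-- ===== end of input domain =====

-- B replaces A's build-totals-list / max / .index three-pass structure by a single-pass argmax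
-- keeping (best total, its first index); objective: simpler (no intermediate list).

-- ===== PORT A =====
def calcProMaxIngSem (matVtas : List (List Int)) (matPrecios : List Int) : Int :=
  let fil : Int := matVtas.length
  -- '[0] * fil' then 'for f in range(fil): lstTotVtas[f] = …' writes slot f exactly once,
  -- so the fill loop is ported as the corresponding map over range(fil) (exact)
  let lstTotVtas : List Int :=
    (PySem.List.pyRange 0 fil 1).map
      (fun f => (PySem.List.pyGetD matVtas f []).sum * PySem.List.pyGetD matPrecios f 0)
  match PySem.List.max? lstTotVtas (fun x => x) with
  | none => 0        -- max([]) raises ValueError; excluded by Pre_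
  | some maxVtas =>
    match PySem.List.index? lstTotVtas maxVtas with
    | none => 0      -- unreachable: the max is a member
    | some i => (i : Int) + 1

-- ===== PORT B =====
def calcProMaxIngSem_alt (matVtas : List (List Int)) (matPrecios : List Int) : Int :=
  let best :=
    (PySem.List.enumerate matVtas 0).foldl
      (fun (acc : Option (Int × Int)) p =>
        let tot := p.2.sum * PySem.List.pyGetD matPrecios p.1 0
        match acc with
        | none => some (tot, p.1)
        | some b => if tot > b.1 then some (tot, p.1) else some b)
      none
  match best with
  | some b => b.2 + 1
  | none => 0        -- best is None: 'best[1]' raises TypeError; excluded by Pre_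

-- ===== PRECONDITION & SPEC =====
-- A raises ValueError on an empty matrix (max of an empty list) and IndexError when matPrecios
-- is shorter than matVtas; exactly those inputs are excluded.
def Pre_calcProMaxIngSem (matVtas : List (List Int)) (matPrecios : List Int) : Prop :=
  0 < matVtas.length ∧ matVtas.length ≤ matPrecios.length
instance (matVtas : List (List Int)) (matPrecios : List Int) : Decidable (Pre_calcProMaxIngSem matVtas matPrecios) := by unfold Pre_calcProMaxIngSem; infer_instance
def pvWitness_calcProMaxIngSem : List (List Int) × List Int := ([[1, 2], [3]], [5, 4])

def Spec_calcProMaxIngSem (matVtas : List (List Int)) (matPrecios : List Int) (out : Int) : Prop := out = calcProMaxIngSem_alt matVtas matPrecios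
instance (matVtas : List (List Int)) (matPrecios : List Int) (out : Int) : Decidable (Spec_calcProMaxIngSem matVtas matPrecios out) := by unfold Spec_calcProMaxIngSem; infer_instance

-- ===== CLAIM (what is proved, stated in full; the proofs are below) =====
def Claim_equal_calcProMaxIngSem : Prop := ∀ (matVtas : List (List Int)) (matPrecios : List Int), Dom_calcProMaxIngSem matVtas matPrecios → Pre_calcProMaxIngSem matVtas matPrecios → Spec_calcProMaxIngSem matVtas matPrecios (calcProMaxIngSem matVtas matPrecios)

-- ===== LEMMAS AND PROOFS =====

-- the list of row totals both programs are about
def pvTotals (matVtas : List (List Int)) (matPrecios : List Int) : List Int :=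
  (PySem.List.enumerate matVtas 0).map (fun p => p.2.sum * PySem.List.pyGetD matPrecios p.1 0)

-- "(m, i) is the maximum of T together with its first index"
def pvIsArgmax (T : List Int) (m : Int) (i : Nat) : Prop :=
  ∃ hi : i < T.length, T[i] = m ∧ (∀ j (hj : j < T.length), j < i → T[j] < m) ∧
    (∀ j (hj : j < T.length), T[j] ≤ m)

theorem pvIsArgmax_unique {T : List Int} {m m' : Int} {i i' : Nat}
    (h : pvIsArgmax T m i) (h' : pvIsArgmax T m' i') : m = m' ∧ i = i' := by
  obtain ⟨hi, hv, hfst, hmax⟩ := h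
  obtain ⟨hi', hv', hfst', hmax'⟩ := h'
  have hmm : m = m' := le_antisymm (hv ▸ hmax' i hi) (hv' ▸ hmax i' hi')
  refine ⟨hmm, ?_⟩
  rcases lt_trichotomy i i' with hlt | heq | hgt
  · exact absurd (hfst' i hi hlt) (by simp [hv, hmm])
  · exact heq
  · exact absurd (hfst i' hi' hgt) (by simp [hv', hmm])

-- A's lstTotVtas is pvTotals
theorem pv_lst_eq_totals (matVtas : List (List Int)) (matPrecios : List Int) :
    (PySem.List.pyRange 0 (matVtas.length : Int) 1).map
      (fun f => (PySem.List.pyGetD matVtas f []).sum * PySem.List.pyGetD matPrecios f 0)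
    = pvTotals matVtas matPrecios := by
  rw [pvTotals, PySem.List.enumerate_eq_map_pyRange matVtas ([] : List Int), List.map_map]
  rfl

-- the index list underlying B's fold: enumerate of the totals
theorem pv_enum_totals (matVtas : List (List Int)) (matPrecios : List Int) :
    (PySem.List.enumerate matVtas 0).map
        (fun p => ((p.2.sum * PySem.List.pyGetD matPrecios p.1 0 : Int), p.1))
      = (PySem.List.enumerate (pvTotals matVtas matPrecios) 0).map (fun q => (q.2, q.1)) := by
  apply List.ext_getElem
  · simp [pvTotals, PySem.List.length_enumerate]
  · intro j h1 h2
    have hjv : j < matVtas.length := by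
      simpa [PySem.List.length_enumerate] using h1
    have hjt : j < (pvTotals matVtas matPrecios).length := by
      simpa [pvTotals, PySem.List.length_enumerate] using hjv
    simp [PySem.List.getElem_enumerate, pvTotals]

-- B's running argmax over enumerate T computes the first argmax of T
theorem pv_argmax_fold (T : List Int) (hT : T ≠ []) :
    ∃ (m : Int) (i : Nat),
      (PySem.List.enumerate T 0).foldl
        (fun (acc : Option (Int × Int)) q =>
          match acc with
          | none => some (q.2, q.1)
          | some b => if q.2 > b.1 then some (q.2, q.1) else some b)
        none = some (m, (i : Int)) ∧ pvIsArgmax T m i := by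
  induction T using List.reverseRecOn with
  | nil => exact absurd rfl hT
  | append_singleton T t ih =>
    by_cases hT0 : T = []
    · subst hT0
      refine ⟨t, 0, ?_, ?_⟩
      · simp [PySem.List.enumerate]
      · refine ⟨by simp, by simp, ?_, ?_⟩
        · intro j hj hjlt
          exact absurd hjlt (Nat.not_lt_zero j)
        · intro j hj
          have hj0 : j = 0 := by simpa using hj
          subst hj0
          simp
    · obtain ⟨m, i, hfold, hi, hv, hfst, hmax⟩ := ih hT0
      have henum : PySem.List.enumerate (T ++ [t]) 0
          = PySem.List.enumerate T 0 ++ [((T.length : Int), t)] := by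
        simpa using PySem.List.enumerate_append (xs := T) (ys := [t]) (s := 0)
      rw [henum, List.foldl_append, hfold]
      by_cases hgt : t > m
      · refine ⟨t, T.length, by simp [hgt], ?_, ?_, ?_, ?_⟩
        · simp
        · simp
        · intro j hj hjlt
          have hjT : j < T.length := by simpa using hjlt
          rw [List.getElem_append_left hjT]
          exact lt_of_le_of_lt (hmax j hjT) hgt
        · intro j hj
          rcases Nat.lt_or_ge j T.length with hjT | hjT
          · rw [List.getElem_append_left hjT]
            exact le_of_lt (lt_of_le_of_lt (hmax j hjT) hgt)
          · have : j = T.length := by simp at hj; omega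
            subst this; simp
      · refine ⟨m, i, by simp [hgt], ?_, ?_, ?_, ?_⟩
        · simp; omega
        · rw [List.getElem_append_left hi]; exact hv
        · intro j hj hjlt
          have hjT : j < T.length := lt_of_lt_of_le hjlt (le_of_lt hi)
          rw [List.getElem_append_left hjT]
          exact hfst j hjT hjlt
        · intro j hj
          rcases Nat.lt_or_ge j T.length with hjT | hjT
          · rw [List.getElem_append_left hjT]; exact hmax j hjT
          · have : j = T.length := by simp at hj; omega
            subst this; simpa using le_of_not_gt hgt
      
-- A's max-then-index pair is the first argmax of T
theorem pv_max_index_argmax {T : List Int} {m : Int} {i : Nat}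
    (hm : PySem.List.max? T (fun x => x) = some m)
    (hidx : PySem.List.index? T m = some i) : pvIsArgmax T m i := by
  obtain ⟨hi, hv, hne⟩ := PySem.List.getElem_of_index?_eq_some hidx
  have hmax := PySem.List.max?_isMax hm
  refine ⟨hi, hv, ?_, ?_⟩
  · intro j hj hjlt
    exact lt_of_le_of_ne (hmax T[j] (List.getElem_mem hj)) (hne j hjlt)
  · intro j hj
    exact hmax T[j] (List.getElem_mem hj)

-- ===== VERDICT (by name: the statement is the Claim_ definition above) =====
theorem calcProMaxIngSem_spec : Claim_equal_calcProMaxIngSem := by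
  intro matVtas matPrecios _ hpre
  obtain ⟨hne0, _⟩ := hpre
  have hne : matVtas ≠ [] := by
    intro h
    rw [h] at hne0
    simp at hne0
  unfold Spec_calcProMaxIngSem calcProMaxIngSem calcProMaxIngSem_alt
  simp only [pv_lst_eq_totals]
  set T := pvTotals matVtas matPrecios with hTdef
  have hTne : T ≠ [] := by
    intro h
    apply hne
    have := congrArg List.length h
    simpa [hTdef, pvTotals, PySem.List.length_enumerate] using this
  -- A side: max? and index? succeed
  have hmne : PySem.List.max? T (fun x => x) ≠ none :=
    fun h => hTne ((PySem.List.max?_eq_none_iff _ _).mp h)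
  obtain ⟨m, hm⟩ := Option.ne_none_iff_exists'.mp hmne
  have hmem : m ∈ T := PySem.List.max?_mem hm
  obtain ⟨i, hidx⟩ := Option.isSome_iff_exists.mp ((PySem.List.index?_isSome_iff _ _).mpr hmem)
  -- B side: rewrite the fold over enumerate matVtas into the fold over enumerate T
  obtain ⟨m', i', hfold, hC'⟩ := pv_argmax_fold T hTne
  have hBfold :
      (PySem.List.enumerate matVtas 0).foldl
        (fun (acc : Option (Int × Int)) p =>
          match acc with
          | none => some (p.2.sum * PySem.List.pyGetD matPrecios p.1 0, p.1)
          | some b =>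
            if p.2.sum * PySem.List.pyGetD matPrecios p.1 0 > b.1 then
              some (p.2.sum * PySem.List.pyGetD matPrecios p.1 0, p.1)
            else some b)
        none
      = (PySem.List.enumerate T 0).foldl
          (fun (acc : Option (Int × Int)) q =>
            match acc with
            | none => some (q.2, q.1)
            | some b => if q.2 > b.1 then some (q.2, q.1) else some b)
          none := by
    have h1 := congrArg
      (fun L : List (Int × Int) => L.foldl
        (fun (acc : Option (Int × Int)) (r : Int × Int) =>
          match acc with
          | none => some r
          | some b => if r.1 > b.1 then some r else some b)
        none)
      (pv_enum_totals matVtas matPrecios)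
    simpa [List.foldl_map] using h1
  have hC := pv_max_index_argmax hm hidx
  obtain ⟨hmeq, hieq⟩ := pvIsArgmax_unique hC hC'
  rw [hBfold, hfold]
  simp only [hm, hidx, hieq]
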